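-- pv_equiv track=rewrite | github.com/simplito/deepfellow-cli | deepfellow/common/docker.py | parse_docker_compose_usage
-- ===== SOURCE A (Python) =====
-- def parse_docker_compose_usage(data: str) -> dict[str, str]:
--     """Parse the output of docker stats command.
--
--     Args:
--         data: The output string from docker stats command
--
--     Returns:
--         Dictionary with container usage information
--     """
--     lines = data.splitlines()
--
--     if len(lines) < 2:
--         return {}
--
--     header_line = lines[0]
--
--     # Define the expected column headers in order (as they appear in docker stats)
--     column_headers = ["CONTAINER ID", "NAME", "CPU %", "MEM USAGE / LIMIT", "MEM %", "NET I/O", "BLOCK I/O", "PIDS"]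
--
--     # Find the start position of each column header
--     indexes = {}
--     for i, header_name in enumerate(column_headers):
--         start = header_line.find(header_name)
--         if start == -1:
--             continue
--
--         # Determine end position (start of next column or end of line)
--         if i < len(column_headers) - 1:
--             # Find where the next column starts
--             next_start = len(header_line)
--             for next_header in column_headers[i + 1 :]:
--                 next_pos = header_line.find(next_header)
--                 if next_pos != -1:
--                     next_start = next_pos
--                     break
--             end = next_start
--         else:
--             end = len(header_line)
--
--         indexes[header_name] = (start, end)
--
--     # Process the first data line (skip header)
--     data_line = lines[1]
--
--     container_info = {}
--     for header_name, (start, end) in indexes.items():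
--         # Extract substring respecting column bounds
--         value = data_line[start:end].strip() if end <= len(data_line) else data_line[start:].strip()
--
--         # Split MEM USAGE / LIMIT into two separate fields
--         if header_name == "MEM USAGE / LIMIT":
--             parts = value.split(" / ")
--             if len(parts) == 2:
--                 container_info["MEM USAGE"] = parts[0].strip()
--                 container_info["MEM LIMIT"] = parts[1].strip()
--         else:
--             container_info[header_name] = value
--
--     return container_info
-- ===== SOURCE B (Python) =====
-- def _entries_for(header: str, value: str) -> list[tuple[str, str]]:
--     """Entries contributed by one column: the MEM column splits into two fields."""
--     if header == "MEM USAGE / LIMIT":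
--         parts = value.split(" / ")
--         return [("MEM USAGE", parts[0].strip()), ("MEM LIMIT", parts[1].strip())] if len(parts) == 2 else []
--     return [(header, value)]
--
--
-- def parse_docker_compose_usage(data: str) -> dict[str, str]:
--     """Parse the output of docker stats command (single backward pass)."""
--     lines = data.splitlines()
--     if len(lines) < 2:
--         return {}
--     header_line, data_line = lines[0], lines[1]
--     column_headers = ["CONTAINER ID", "NAME", "CPU %", "MEM USAGE / LIMIT", "MEM %", "NET I/O", "BLOCK I/O", "PIDS"]
--     # Walk the columns right-to-left, carrying the current column boundary `end`:
--     # each found header's span ends where the previously found (later) header starts.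
--     entries = []
--     end = len(header_line)
--     for header in reversed(column_headers):
--         start = header_line.find(header)
--         if start == -1:
--             continue
--         entries[:0] = _entries_for(header, data_line[start:end].strip())
--         end = start
--     return dict(entries)
-- ===== Notes on version B (the rewrite author's own statement) =====
-- stated objective: simpler
-- what changed: Replaced A's two-stage forward construction (find each header, rescan the remaining headers for the next found start, store a span dict, then a second extraction loop) with one backward pass over the columns that carries the current right boundary in an accumulator and extracts each value immediately, prepending entries.
import Mathlib
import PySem

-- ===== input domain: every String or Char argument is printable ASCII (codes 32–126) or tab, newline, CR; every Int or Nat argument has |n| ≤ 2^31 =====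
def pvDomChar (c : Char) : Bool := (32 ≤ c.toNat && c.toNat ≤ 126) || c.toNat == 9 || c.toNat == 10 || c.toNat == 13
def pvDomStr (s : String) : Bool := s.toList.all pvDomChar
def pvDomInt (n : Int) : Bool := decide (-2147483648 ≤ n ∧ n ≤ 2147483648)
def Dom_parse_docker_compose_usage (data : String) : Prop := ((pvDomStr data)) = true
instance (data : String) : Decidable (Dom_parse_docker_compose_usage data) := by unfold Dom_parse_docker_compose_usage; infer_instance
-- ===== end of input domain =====

-- B replaces A's two-stage forward construction (span dict with a nested next-header rescan,
-- then an extraction loop) with one backward pass carrying the current right boundary.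

-- shared constant: the literal column-header list of the Python source
def pvColumnHeaders : List String :=
  ["CONTAINER ID", "NAME", "CPU %", "MEM USAGE / LIMIT", "MEM %", "NET I/O", "BLOCK I/O", "PIDS"]

-- ===== PORT A =====

-- inner loop: 'next_start = len(header_line); for next_header in rest: if find != -1: next_start = pos; break'
def pvNextStartA (header_line : String) : List String → Int
  | [] => (PySem.Str.len header_line : Int)
  | nh :: rest =>
      let next_pos := PySem.Str.find header_line nh
      if next_pos = -1 then pvNextStartA header_line rest else next_pos

-- first loop: build the 'indexes' dict (for header i, end = the next found header's start, or
-- len(header_line) when no later header is found — which also covers the Python last-header else-branch)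
def pvIndexesA (header_line : String) : List String → PySem.Dict String (Int × Int) →
    PySem.Dict String (Int × Int)
  | [], acc => acc
  | h :: rest, acc =>
      let start := PySem.Str.find header_line h
      if start = -1 then pvIndexesA header_line rest acc
      else pvIndexesA header_line rest (acc.insert h (start, pvNextStartA header_line rest))

-- second loop over indexes.items()
def pvExtractA (data_line : String) : List (String × (Int × Int)) → PySem.Dict String String →
    PySem.Dict String String
  | [], acc => acc
  | (h, (s, e)) :: rest, acc =>
      let value :=
        if e ≤ (PySem.Str.len data_line : Int) then
          PySem.Str.strip (PySem.Str.slice data_line (some s) (some e))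
        else
          PySem.Str.strip (PySem.Str.slice data_line (some s) none)
      let acc' :=
        if h = "MEM USAGE / LIMIT" then
          match PySem.Str.split? value " / " with
          | some [p0, p1] =>
              (acc.insert "MEM USAGE" (PySem.Str.strip p0)).insert "MEM LIMIT" (PySem.Str.strip p1)
          | _ => acc
        else acc.insert h value
      pvExtractA data_line rest acc'

def parse_docker_compose_usage (data : String) : List (String × String) :=
  match PySem.Str.splitlines data with
  | header_line :: data_line :: _ =>
      let indexes := pvIndexesA header_line pvColumnHeaders PySem.Dict.empty
      (pvExtractA data_line indexes.items PySem.Dict.empty).items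
  | _ => []

-- ===== PORT B =====

-- '[...] if len(parts) == 2 else []' of _entries_for
def pvMemEntries : Option (List String) → List (String × String)
  | some [p0, p1] => [("MEM USAGE", PySem.Str.strip p0), ("MEM LIMIT", PySem.Str.strip p1)]
  | _ => []

-- helper _entries_for of Source B
def pvEntriesFor (header value : String) : List (String × String) :=
  if header = "MEM USAGE / LIMIT" then pvMemEntries (PySem.Str.split? value " / ")
  else [(header, value)]

-- loop body of the single backward pass: state = (end boundary, entries built so far);
-- a found header extracts data_line[start:end] at once, prepends its entry/entries and moves the boundary
def pvRevStepB (header_line data_line : String)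
    (st : Int × List (String × String)) (h : String) : Int × List (String × String) :=
  let start := PySem.Str.find header_line h
  if start = -1 then st
  else
    (start, pvEntriesFor h (PySem.Str.strip (PySem.Str.slice data_line (some start) (some st.1)))
      ++ st.2)

def parse_docker_compose_usage_alt (data : String) : List (String × String) :=
  match PySem.Str.splitlines data with
  | header_line :: data_line :: _ =>
      -- 'for header in reversed(column_headers): …' with state (end, entries)
      let st := pvColumnHeaders.reverse.foldl (pvRevStepB header_line data_line)
        ((PySem.Str.len header_line : Int), [])
      -- 'return dict(entries)'
      (st.2.foldl (fun d p => d.insert p.1 p.2)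
        (PySem.Dict.empty : PySem.Dict String String)).items
  | _ => []

-- ===== PRECONDITION & SPEC =====
def Spec_parse_docker_compose_usage (data : String) (out : List (String × String)) : Prop := out = parse_docker_compose_usage_alt data
instance (data : String) (out : List (String × String)) : Decidable (Spec_parse_docker_compose_usage data out) := by unfold Spec_parse_docker_compose_usage; infer_instance

-- ===== CLAIM =====
def Claim_equal_parse_docker_compose_usage : Prop := ∀ (data : String), Dom_parse_docker_compose_usage data → Spec_parse_docker_compose_usage data (parse_docker_compose_usage data)

-- ===== LEMMAS AND PROOFS =====

-- the list of (header, (start, end)) pairs A's first loop inserts, in insertion order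
def pvSpansA (header_line : String) : List String → List (String × (Int × Int))
  | [] => []
  | h :: rest =>
      let start := PySem.Str.find header_line h
      if start = -1 then pvSpansA header_line rest
      else (h, (start, pvNextStartA header_line rest)) :: pvSpansA header_line rest

-- the entries a span contributes, in order
def pvEntryOf (data_line : String) (p : String × (Int × Int)) : List (String × String) :=
  pvEntriesFor p.1 (PySem.Str.strip (PySem.Str.slice data_line (some p.2.1) (some p.2.2)))

def pvEntries (data_line : String) (spans : List (String × (Int × Int))) :
    List (String × String) :=
  spans.flatMap (pvEntryOf data_line)

lemma pvIndexesA_eq_foldl (header_line : String) (hs : List String)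
    (acc : PySem.Dict String (Int × Int)) :
    pvIndexesA header_line hs acc =
      (pvSpansA header_line hs).foldl (fun d p => d.insert p.1 p.2) acc := by
  induction hs generalizing acc with
  | nil => rfl
  | cons h rest ih =>
      simp only [pvIndexesA, pvSpansA]
      split_ifs with hf
      · simp only [ih]
      · simp only [ih, List.foldl_cons]

lemma pvSpansA_keys_sublist (header_line : String) (hs : List String) :
    ((pvSpansA header_line hs).map Prod.fst).Sublist hs := by
  induction hs with
  | nil => simp [pvSpansA]
  | cons h rest ih =>
      simp only [pvSpansA]
      split_ifs with hf
      · exact ih.cons h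
      · simpa using ih.cons₂ h

-- slicing past the end clamps: xs[s:e] = xs[s:] when len(xs) < e
lemma pvSlice_past_end_list {α : Type} (xs : List α) (a e : Int)
    (h : (xs.length : Int) < e) :
    PySem.List.slice xs (some a) (some e) = PySem.List.slice xs (some a) none := by
  have he : ¬ e < 0 := by omega
  have hm : min e.toNat xs.length = xs.length := by omega
  simp only [PySem.List.slice, PySem.List.clampIdx, if_neg he, hm]

lemma pvSlice_past_end (data_line : String) (a e : Int)
    (h : (PySem.Str.len data_line : Int) < e) :
    PySem.Str.slice data_line (some a) (some e) = PySem.Str.slice data_line (some a) none := by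
  apply String.toList_inj.mp
  simp only [PySem.Str.toList_slice, PySem.Chars.slice_eq_listSlice]
  apply pvSlice_past_end_list
  simpa using h

-- A's extraction loop is a fold of fresh inserts over the flat entries list
lemma pvExtractA_eq_entries (data_line : String) (spans : List (String × (Int × Int)))
    (acc : PySem.Dict String String) :
    pvExtractA data_line spans acc =
      (pvEntries data_line spans).foldl (fun d p => d.insert p.1 p.2) acc := by
  induction spans generalizing acc with
  | nil => rfl
  | cons p rest ih =>
      obtain ⟨h, s, e⟩ := p
      simp only [pvExtractA, pvEntries, List.flatMap_cons, List.foldl_append]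
      have hval : (if e ≤ (PySem.Str.len data_line : Int) then
            PySem.Str.strip (PySem.Str.slice data_line (some s) (some e))
          else PySem.Str.strip (PySem.Str.slice data_line (some s) none)) =
          PySem.Str.strip (PySem.Str.slice data_line (some s) (some e)) := by
        split_ifs with hle
        · rfl
        · rw [pvSlice_past_end data_line s e (by omega)]
      rw [hval]
      simp only [pvEntryOf, pvEntriesFor]
      split_ifs with hm
      · cases hsp : PySem.Str.split? (PySem.Str.strip (PySem.Str.slice data_line (some s) (some e))) " / " with
        | none => simpa [hsp, pvMemEntries, pvEntries] using ih _
        | some parts =>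
            match parts with
            | [] => simpa [hsp, pvMemEntries, pvEntries] using ih _
            | [p0] => simpa [hsp, pvMemEntries, pvEntries] using ih _
            | [p0, p1] => simpa [hsp, pvMemEntries, pvEntries] using ih _
            | p0 :: p1 :: p2 :: ps => simpa [hsp, pvMemEntries, pvEntries] using ih _
      · simpa [pvEntries] using ih _

-- B's backward fold computes (first found start or len, the same flat entries list)
lemma pvRevFold_eq (header_line data_line : String) (hs : List String) :
    hs.reverse.foldl (pvRevStepB header_line data_line)
        ((PySem.Str.len header_line : Int), []) =
      (pvNextStartA header_line hs, pvEntries data_line (pvSpansA header_line hs)) := by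
  induction hs with
  | nil => rfl
  | cons h rest ih =>
      rw [List.reverse_cons, List.foldl_append, ih, List.foldl_cons, List.foldl_nil]
      simp only [pvRevStepB, pvNextStartA, pvSpansA]
      split_ifs with hf
      · rfl
      · simp only [pvEntries, List.flatMap_cons, pvEntryOf]

lemma pvItems_foldl (spans : List (String × (Int × Int))) (hnd : (spans.map Prod.fst).Nodup) :
    (spans.foldl (fun d p => d.insert p.1 p.2) PySem.Dict.empty).items = spans := by
  have := PySem.Dict.items_foldl_insert_fresh (l := spans) (k := Prod.fst) (v := Prod.snd)
    (d := PySem.Dict.empty) (by intro a _; simp) hnd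
  simpa using this

-- ===== VERDICT =====
theorem parse_docker_compose_usage_spec : Claim_equal_parse_docker_compose_usage := by
  intro data _
  unfold Spec_parse_docker_compose_usage parse_docker_compose_usage parse_docker_compose_usage_alt
  cases hsplit : PySem.Str.splitlines data with
  | nil => rfl
  | cons header_line rest =>
      cases rest with
      | nil => rfl
      | cons data_line rest' =>
          show (pvExtractA data_line
              (pvIndexesA header_line pvColumnHeaders PySem.Dict.empty).items
              PySem.Dict.empty).items =
            (((pvColumnHeaders.reverse.foldl (pvRevStepB header_line data_line)
                ((PySem.Str.len header_line : Int), [])).2).foldl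
              (fun d p => d.insert p.1 p.2) (PySem.Dict.empty : PySem.Dict String String)).items
          rw [pvIndexesA_eq_foldl,
            pvItems_foldl _ ((pvSpansA_keys_sublist header_line pvColumnHeaders).nodup (by decide)),
            pvExtractA_eq_entries, pvRevFold_eq]
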